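-- pv_equiv track=rewrite | github.com/AlexanderPerez11/INME4003_Projects | Hardy_Cross/HardyCross_HybridSolver_V2.py | find_shared_indexes
-- ===== SOURCE A (Python) =====
-- def find_shared_indexes(arr):
--     shared_indexes = []
--     for i in range(len(arr)):
--         for j in range(len(arr[i])):
--             val = arr[i][j]
--             if val not in [x[0] for x in shared_indexes]:
--                 for k in range(i + 1, len(arr)):
--                     if val in arr[k]:
--                         shared_indexes.append((val, i, k))
--                         break
--     return shared_indexes
-- ===== SOURCE B (Python) =====
-- def find_shared_indexes(arr):
--     rows = {}
--     for i, row in enumerate(arr):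
--         for val in dict.fromkeys(row):
--             rows.setdefault(val, []).append(i)
--     return [(v, rs[0], rs[1]) for v, rs in rows.items() if len(rs) >= 2]
-- ===== Notes on version B (the rewrite author's own statement) =====
-- stated objective: faster
-- what changed: Replaces the quadratic scan (for every value, a linear membership check against the result list plus a forward scan over all later rows) with a single pass that groups row indexes by value in a dict keyed by value, then emits the first two rows of every value seen in at least two rows, in first-appearance order.
import Mathlib
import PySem

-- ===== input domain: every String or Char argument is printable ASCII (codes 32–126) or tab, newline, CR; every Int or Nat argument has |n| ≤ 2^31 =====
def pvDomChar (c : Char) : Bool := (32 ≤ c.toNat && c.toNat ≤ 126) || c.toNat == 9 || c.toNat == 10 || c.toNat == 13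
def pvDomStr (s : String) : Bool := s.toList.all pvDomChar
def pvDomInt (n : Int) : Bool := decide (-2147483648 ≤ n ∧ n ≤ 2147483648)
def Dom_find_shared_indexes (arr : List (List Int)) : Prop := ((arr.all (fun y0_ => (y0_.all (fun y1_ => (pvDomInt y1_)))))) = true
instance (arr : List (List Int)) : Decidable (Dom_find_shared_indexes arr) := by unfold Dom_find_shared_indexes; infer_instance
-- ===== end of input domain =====

-- B replaces A's repeated rescanning (a membership test against the result list plus a forward
-- scan over all later rows, for every element) with a single pass grouping row indexes by value
-- in a dict; measurably faster. Proved: same returned list on every input.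

-- ===== PORT A =====
def find_shared_indexes (arr : List (List Int)) : List (Int × Int × Int) :=
  (PySem.List.pyRange 0 (arr.length : Int)).foldl (fun shared i =>
    (PySem.List.pyRange 0 ((PySem.List.pyGetD arr i []).length : Int)).foldl (fun shared j =>
      let val := PySem.List.pyGetD (PySem.List.pyGetD arr i []) j 0
      if val ∈ shared.map (fun x => x.1) then shared
      else
        match (PySem.List.pyRange (i + 1) (arr.length : Int)).find?
            (fun k => decide (val ∈ PySem.List.pyGetD arr k [])) with
        | some k => shared ++ [(val, i, k)]
        | none => shared) shared) []

-- ===== PORT B =====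
def find_shared_indexes_alt (arr : List (List Int)) : List (Int × Int × Int) :=
  let rows : PySem.Dict Int (List Int) :=
    (PySem.List.enumerate arr 0).foldl (fun d p =>
      (PySem.List.dedup p.2).foldl (fun d v => d.modify v [] (fun rs => rs ++ [p.1])) d)
      PySem.Dict.empty
  rows.items.filterMap (fun q =>
    match q.2 with
    | r1 :: r2 :: _ => some (q.1, r1, r2)
    | _ => none)

-- ===== PRECONDITION & SPEC =====
def Spec_find_shared_indexes (arr : List (List Int)) (out : List (Int × Int × Int)) : Prop := out = find_shared_indexes_alt arr
instance (arr : List (List Int)) (out : List (Int × Int × Int)) : Decidable (Spec_find_shared_indexes arr out) := by unfold Spec_find_shared_indexes; infer_instance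

-- ===== CLAIM (what is proved, stated in full; the proofs are below) =====
def Claim_equal_find_shared_indexes : Prop := ∀ (arr : List (List Int)), Dom_find_shared_indexes arr → Spec_find_shared_indexes arr (find_shared_indexes arr)

-- ===== LEMMAS AND PROOFS =====

-- A's flattened iteration order: (row index, value), every element, rows in order.
def pvPairsA (arr : List (List Int)) : List (Int × Int) :=
  (PySem.List.enumerate arr 0).flatMap (fun p => p.2.map (fun v => (p.1, v)))

-- B's flattened iteration order: (value, row index), each row deduplicated.
def pvPairsB (arr : List (List Int)) : List (Int × Int) :=
  (PySem.List.enumerate arr 0).flatMap (fun p => (PySem.List.dedup p.2).map (fun v => (v, p.1)))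

-- the (distinct, increasing) indexes of the rows containing v
def pvRows (arr : List (List Int)) (v : Int) : List Int :=
  ((pvPairsB arr).filter (fun q => q.1 == v)).map (fun q => q.2)

def pvEntry (arr : List (List Int)) (v : Int) : Option (Int × Int × Int) :=
  match pvRows arr v with
  | r1 :: r2 :: _ => some (v, r1, r2)
  | _ => none

def pvModel (arr : List (List Int)) (seen : List Int) : List (Int × Int × Int) :=
  seen.filterMap (pvEntry arr)

-- A's loop body on one flattened (row index, value) pair
def pvStepA (arr : List (List Int)) (shared : List (Int × Int × Int)) (q : Int × Int) :
    List (Int × Int × Int) :=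
  if q.2 ∈ shared.map (fun x => x.1) then shared
  else
    match (PySem.List.pyRange (q.1 + 1) (arr.length : Int)).find?
        (fun k => decide (q.2 ∈ PySem.List.pyGetD arr k [])) with
    | some k => shared ++ [(q.2, q.1, k)]
    | none => shared

lemma pvPairsB_char (arr : List (List Int)) (v k : Int) :
    (v, k) ∈ pvPairsB arr ↔ 0 ≤ k ∧ k < (arr.length : Int) ∧ v ∈ PySem.List.pyGetD arr k [] := by
  simp only [pvPairsB, List.mem_flatMap, PySem.List.mem_enumerate_iff, List.mem_map]
  constructor
  · rintro ⟨p, ⟨n, hn, rfl⟩, w, hw, hwe⟩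
    rw [PySem.List.mem_dedup] at hw
    simp only [Prod.mk.injEq] at hwe
    obtain ⟨rfl, hk⟩ := hwe
    have hk' : k = (n : Int) := by simpa using hk.symm
    subst hk'
    refine ⟨by omega, by exact_mod_cast hn, ?_⟩
    rw [PySem.List.pyGetD_eq_getElem arr [] (by omega) (by exact_mod_cast hn)]
    simpa using hw
  · rintro ⟨h0, hlen, hmem⟩
    refine ⟨(0 + (k.toNat : Int), arr[k.toNat]'(by omega)), ⟨k.toNat, by omega, rfl⟩, v, ?_, ?_⟩
    · rw [PySem.List.mem_dedup]
      rwa [PySem.List.pyGetD_eq_getElem arr [] h0 hlen] at hmem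
    · simp [Int.toNat_of_nonneg h0]

lemma pvPairsA_char (arr : List (List Int)) (k v : Int) :
    (k, v) ∈ pvPairsA arr ↔ 0 ≤ k ∧ k < (arr.length : Int) ∧ v ∈ PySem.List.pyGetD arr k [] := by
  simp only [pvPairsA, List.mem_flatMap, PySem.List.mem_enumerate_iff, List.mem_map]
  constructor
  · rintro ⟨p, ⟨n, hn, rfl⟩, w, hw, hwe⟩
    simp only [Prod.mk.injEq] at hwe
    obtain ⟨hk, rfl⟩ := hwe
    have hk' : k = (n : Int) := by simpa using hk.symm
    subst hk'
    refine ⟨by omega, by exact_mod_cast hn, ?_⟩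
    rw [PySem.List.pyGetD_eq_getElem arr [] (by omega) (by exact_mod_cast hn)]
    simpa using hw
  · rintro ⟨h0, hlen, hmem⟩
    refine ⟨(0 + (k.toNat : Int), arr[k.toNat]'(by omega)), ⟨k.toNat, by omega, rfl⟩, v, ?_, ?_⟩
    · rwa [PySem.List.pyGetD_eq_getElem arr [] h0 hlen] at hmem
    · simp [Int.toNat_of_nonneg h0]

lemma pvRows_char (arr : List (List Int)) (v k : Int) :
    k ∈ pvRows arr v ↔ 0 ≤ k ∧ k < (arr.length : Int) ∧ v ∈ PySem.List.pyGetD arr k [] := by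
  rw [← pvPairsB_char]
  simp only [pvRows, List.mem_map, List.mem_filter]
  constructor
  · rintro ⟨q, ⟨hq, hq1⟩, rfl⟩
    have : q.1 = v := by simpa using hq1
    exact this ▸ hq
  · intro h
    exact ⟨(v, k), ⟨h, by simp⟩, rfl⟩

lemma pvPairsA_pairwise (arr : List (List Int)) :
    (pvPairsA arr).Pairwise (fun q q' => q.1 ≤ q'.1) := by
  unfold pvPairsA
  rw [List.pairwise_flatMap]
  constructor
  · intro p _
    rw [List.pairwise_map]
    exact List.pairwise_iff_getElem.mpr (fun i j hi hj hij => le_refl _)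
  · refine (PySem.List.pairwise_lt_enumerate arr 0).imp_of_mem ?_
    intro p p' _ _ hlt x hx y hy
    obtain ⟨w, _, rfl⟩ := List.mem_map.mp hx
    obtain ⟨w', _, rfl⟩ := List.mem_map.mp hy
    exact le_of_lt hlt

lemma pvPairsB_pairwise (arr : List (List Int)) :
    (pvPairsB arr).Pairwise (fun q q' => q.1 = q'.1 → q.2 < q'.2) := by
  unfold pvPairsB
  rw [List.pairwise_flatMap]
  constructor
  · intro p _
    rw [List.pairwise_map]
    have hnd : (PySem.List.dedup p.2).Nodup := by
      rw [PySem.List.dedup_eq_ofList]; exact PySem.Set.nodup_ofList _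
    exact hnd.imp (fun hne => by simp only; intro h; exact absurd h hne)
  · refine (PySem.List.pairwise_lt_enumerate arr 0).imp_of_mem ?_
    intro p p' _ _ hlt x hx y hy
    obtain ⟨w, _, rfl⟩ := List.mem_map.mp hx
    obtain ⟨w', _, rfl⟩ := List.mem_map.mp hy
    exact fun _ => hlt

lemma pvRows_pairwise (arr : List (List Int)) (v : Int) :
    (pvRows arr v).Pairwise (· < ·) := by
  unfold pvRows
  rw [List.pairwise_map]
  refine ((pvPairsB_pairwise arr).filter _).imp_of_mem ?_
  intro q q' hq hq' h
  have h1 : q.1 = v := by simpa using (List.mem_filter.mp hq).2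
  have h2 : q'.1 = v := by simpa using (List.mem_filter.mp hq').2
  exact h (h1.trans h2.symm)

lemma map_fst_pvModel (arr : List (List Int)) (seen : List Int) :
    (pvModel arr seen).map (fun x => x.1)
      = seen.filter (fun w => decide (2 ≤ (pvRows arr w).length)) := by
  induction seen with
  | nil => rfl
  | cons w seen ih =>
    simp only [pvModel, List.filterMap_cons, List.filter_cons] at *
    rcases hr : pvRows arr w with _ | ⟨r1, _ | ⟨r2, t⟩⟩
    · rw [show pvEntry arr w = none from by simp [pvEntry, hr]]; simp [ih]
    · rw [show pvEntry arr w = none from by simp [pvEntry, hr]]; simp [ih]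
    · rw [show pvEntry arr w = some (w, r1, r2) from by simp [pvEntry, hr]]
      simp [ih]

lemma pv_find_none (arr : List (List Int)) (v i : Int) (hi : 0 ≤ i)
    (h : ∀ k ∈ pvRows arr v, k ≤ i) :
    (PySem.List.pyRange (i + 1) (arr.length : Int)).find?
      (fun k => decide (v ∈ PySem.List.pyGetD arr k [])) = none := by
  rw [List.find?_eq_none]
  intro k hk hpred
  rw [PySem.List.mem_pyRange_one] at hk
  have hkm : k ∈ pvRows arr v :=
    (pvRows_char arr v k).mpr ⟨by omega, hk.2, by simpa using hpred⟩
  have := h k hkm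
  omega

lemma pv_find_some (arr : List (List Int)) (v i r2 : Int) (t : List Int) (hi : 0 ≤ i)
    (hr : pvRows arr v = i :: r2 :: t) :
    (PySem.List.pyRange (i + 1) (arr.length : Int)).find?
      (fun k => decide (v ∈ PySem.List.pyGetD arr k [])) = some r2 := by
  have hsort := pvRows_pairwise arr v
  rw [hr] at hsort
  have hir2 : i < r2 := (List.pairwise_cons.mp hsort).1 r2 (by simp)
  have ht : ∀ x ∈ t, r2 < x :=
    (List.pairwise_cons.mp (List.pairwise_cons.mp hsort).2).1
  have hr2mem : r2 ∈ pvRows arr v := by rw [hr]; simp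
  obtain ⟨hr20, hr2len, hr2in⟩ := (pvRows_char arr v r2).mp hr2mem
  rw [PySem.List.pyRange_one_append (i + 1) r2 (arr.length : Int) (by omega) (by omega),
    List.find?_append]
  have h1 : (PySem.List.pyRange (i + 1) r2).find?
      (fun k => decide (v ∈ PySem.List.pyGetD arr k [])) = none := by
    rw [List.find?_eq_none]
    intro k hk hpred
    rw [PySem.List.mem_pyRange_one] at hk
    have hklen : k < (arr.length : Int) := by omega
    have hmem : k ∈ pvRows arr v :=
      (pvRows_char arr v k).mpr ⟨by omega, hklen, by simpa using hpred⟩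
    rw [hr] at hmem
    simp only [List.mem_cons] at hmem
    rcases hmem with rfl | rfl | h'
    · omega
    · omega
    · have := ht k h'; omega
  rw [h1, PySem.List.pyRange_one_cons (by omega : r2 < (arr.length : Int)),
    List.find?_cons_of_pos (by simpa using hr2in)]
  rfl

lemma pvStepA_model (arr : List (List Int)) (P1 P2 : List (Int × Int)) (i v : Int)
    (h : pvPairsA arr = P1 ++ (i, v) :: P2) :
    pvStepA arr (pvModel arr (PySem.Set.ofList (P1.map (fun q => q.2)))) (i, v)
      = pvModel arr (PySem.Set.add (PySem.Set.ofList (P1.map (fun q => q.2))) v) := by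
  set S := PySem.Set.ofList (P1.map (fun q => q.2)) with hS
  have hcur : (i, v) ∈ pvPairsA arr := by rw [h]; simp
  obtain ⟨hi0, hilen, hiin⟩ := (pvPairsA_char arr i v).mp hcur
  have himem : i ∈ pvRows arr v := (pvRows_char arr v i).mpr ⟨hi0, hilen, hiin⟩
  unfold pvStepA
  simp only
  by_cases hmem : v ∈ (pvModel arr S).map (fun x => x.1)
  · rw [if_pos hmem]
    rw [map_fst_pvModel, List.mem_filter] at hmem
    rw [PySem.Set.add_of_mem hmem.1]
  · rw [if_neg hmem]
    rw [map_fst_pvModel, List.mem_filter] at hmem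
    rw [not_and] at hmem
    by_cases hvS : v ∈ S
    · -- v was tried before but had no second row: it has exactly one row, i, and the
      -- forward search fails again
      have hlen : ¬ (2 ≤ (pvRows arr v).length) := by
        intro h2
        exact absurd (by simpa using h2) (by simpa using hmem hvS)
      have hrows : pvRows arr v = [i] := by
        rcases hrr : pvRows arr v with _ | ⟨r1, _ | ⟨r2, t⟩⟩
        · rw [hrr] at himem; cases himem
        · rw [hrr] at himem; simp only [List.mem_singleton] at himem; rw [himem]
        · rw [hrr] at hlen; simp at hlen
      rw [pv_find_none arr v i hi0
        (by rw [hrows]; intro k hk; simp only [List.mem_singleton] at hk; omega)]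
      rw [PySem.Set.add_of_mem hvS]
    · -- v is fresh: i is the first row containing v
      have hnotP1 : v ∉ P1.map (fun q => q.2) := by
        intro hv; exact hvS (by rw [hS, PySem.Set.mem_ofList]; exact hv)
      have hge : ∀ k ∈ pvRows arr v, i ≤ k := by
        intro k hk
        by_contra hlt
        obtain ⟨hk0, hklen, hkin⟩ := (pvRows_char arr v k).mp hk
        have hkA : (k, v) ∈ pvPairsA arr := (pvPairsA_char arr k v).mpr ⟨hk0, hklen, hkin⟩
        rw [h] at hkA
        rcases List.mem_append.mp hkA with h1 | h1
        · exact hnotP1 (List.mem_map.mpr ⟨(k, v), h1, rfl⟩)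
        · rcases List.mem_cons.mp h1 with h2 | h2
          · simp only [Prod.mk.injEq] at h2; omega
          · have hpw := pvPairsA_pairwise arr
            rw [h] at hpw
            have h3 := (List.pairwise_cons.mp (List.pairwise_append.mp hpw).2.1).1 (k, v) h2
            simp only at h3
            omega
      rcases hrr : pvRows arr v with _ | ⟨r1, rest⟩
      · rw [hrr] at himem; cases himem
      have hr1 : r1 = i := by
        have h1 : i ≤ r1 := hge r1 (by rw [hrr]; simp)
        rw [hrr] at himem
        rcases List.mem_cons.mp himem with rfl | h2
        · rfl
        · have hpw := pvRows_pairwise arr v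
          rw [hrr] at hpw
          have := (List.pairwise_cons.mp hpw).1 i h2
          omega
      subst hr1
      rcases rest with _ | ⟨r2, t⟩
      · -- v's only row is i: the search fails and v contributes no entry
        rw [pv_find_none arr v r1 hi0
          (by rw [hrr]; intro k hk; simp only [List.mem_singleton] at hk; omega)]
        rw [PySem.Set.add_of_not_mem hvS]
        have he : pvEntry arr v = none := by simp [pvEntry, hrr]
        simp [pvModel, List.filterMap_append, he]
      · -- v's rows are i :: r2 :: t: the search returns r2, the second row
        rw [pv_find_some arr v r1 r2 t hi0 hrr]
        rw [PySem.Set.add_of_not_mem hvS]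
        have he : pvEntry arr v = some (v, r1, r2) := by simp [pvEntry, hrr]
        simp [pvModel, List.filterMap_append, he]

lemma pvLoopA_inv (arr : List (List Int)) :
    ∀ (P2 P1 : List (Int × Int)), pvPairsA arr = P1 ++ P2 →
    P2.foldl (pvStepA arr) (pvModel arr (PySem.Set.ofList (P1.map (fun q => q.2))))
      = pvModel arr (PySem.Set.ofList (((P1 ++ P2).map (fun q => q.2)))) := by
  intro P2
  induction P2 with
  | nil => intro P1 h; simp
  | cons q P2 ih =>
    intro P1 h
    obtain ⟨i, v⟩ := q
    rw [List.foldl_cons, pvStepA_model arr P1 P2 i v h, ← PySem.Set.ofList_append_singleton]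
    have h' : pvPairsA arr = (P1 ++ [(i, v)]) ++ P2 := by simpa using h
    have key := ih (P1 ++ [(i, v)]) h'
    simp only [List.map_append, List.map_cons, List.map_nil, List.append_assoc,
      List.cons_append, List.nil_append] at key ⊢
    exact key

lemma pvA_eq (arr : List (List Int)) :
    find_shared_indexes arr
      = pvModel arr (PySem.Set.ofList ((pvPairsA arr).map (fun q => q.2))) := by
  have h1 : find_shared_indexes arr = (pvPairsA arr).foldl (pvStepA arr) [] := by
    show (PySem.List.pyRange 0 (arr.length : Int)).foldl
        (fun shared i =>
          (PySem.List.pyRange 0 ((PySem.List.pyGetD arr i []).length : Int)).foldl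
            (fun shared j =>
              pvStepA arr shared (i, PySem.List.pyGetD (PySem.List.pyGetD arr i []) j 0))
            shared) []
      = (pvPairsA arr).foldl (pvStepA arr) []
    have hinner : ∀ (i : Int) (sh : List (Int × Int × Int)),
        (PySem.List.pyRange 0 ((PySem.List.pyGetD arr i []).length : Int)).foldl
          (fun shared j =>
            pvStepA arr shared (i, PySem.List.pyGetD (PySem.List.pyGetD arr i []) j 0)) sh
        = (PySem.List.pyGetD arr i []).foldl (fun sh2 val => pvStepA arr sh2 (i, val)) sh :=
      fun i sh => PySem.List.foldl_pyRange_zero_pyGetD' (PySem.List.pyGetD arr i []) 0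
        (fun sh2 val => pvStepA arr sh2 (i, val)) sh
    simp only [hinner]
    simp only [pvPairsA, List.foldl_flatMap, List.foldl_map]
    rw [PySem.List.enumerate_eq_map_pyRange arr [], List.foldl_map]
    simp only [PySem.List.len_eq]
  rw [h1]
  have := pvLoopA_inv arr (pvPairsA arr) [] (by simp)
  simpa [pvModel] using this

lemma pv_update_ofList (s : PySem.Set Int) (xs : List Int) :
    PySem.Set.update s (PySem.Set.ofList xs) = PySem.Set.update s xs := by
  rw [PySem.Set.update_eq_append_filter, PySem.Set.update_eq_append_filter,
    PySem.Set.ofList_ofList]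

lemma pvB_eq (arr : List (List Int)) :
    find_shared_indexes_alt arr
      = pvModel arr (PySem.Set.ofList ((pvPairsB arr).map (fun q => q.1))) := by
  have hd : (PySem.List.enumerate arr 0).foldl (fun d p =>
        (PySem.List.dedup p.2).foldl (fun d v => d.modify v [] (fun rs => rs ++ [p.1])) d)
        PySem.Dict.empty
      = (pvPairsB arr).foldl (fun d q => d.modify q.1 [] (fun rs => rs ++ [q.2]))
          PySem.Dict.empty := by
    simp only [pvPairsB, List.foldl_flatMap, List.foldl_map]
  set D := (pvPairsB arr).foldl (fun d q => d.modify q.1 [] (fun rs => rs ++ [q.2]))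
      PySem.Dict.empty with hD
  have hkeys : D.keys = PySem.Set.ofList ((pvPairsB arr).map (fun q => q.1)) := by
    rw [hD, PySem.Dict.keys_foldl_modify_key (pvPairsB arr) (fun q => q.1) []
      (fun _ q => (fun rs => rs ++ [q.2])) PySem.Dict.empty]
    rw [PySem.Dict.keys_empty, PySem.Set.update_nil_left]
  have hnd : D.keys.Nodup := by
    rw [hD]
    exact PySem.Dict.nodup_keys_foldl_modify_key (pvPairsB arr) (fun q => q.1) []
      (fun _ q => (fun rs => rs ++ [q.2])) PySem.Dict.empty
      (by rw [PySem.Dict.keys_empty]; exact List.nodup_nil)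
  have hgetD : ∀ v : Int, D.getD v [] = pvRows arr v := by
    intro v
    rw [hD, PySem.Dict.getD_foldl_modify_append (pvPairsB arr) PySem.Dict.empty v]
    rw [PySem.Dict.getD_empty]
    rfl
  have hitems : D.items = (PySem.Set.ofList ((pvPairsB arr).map (fun q => q.1))).map
      (fun v => (v, pvRows arr v)) := by
    rw [PySem.Dict.items_eq_map_keys D hnd [], hkeys]
    exact List.map_congr_left (fun v _ => by rw [hgetD v])
  show (((PySem.List.enumerate arr 0).foldl _ PySem.Dict.empty).items).filterMap _ = _
  rw [hd, hitems, List.filterMap_map]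
  rfl

lemma pv_upd_flat (l : List (Int × List Int)) :
    ∀ s : PySem.Set Int,
      PySem.Set.update s (l.flatMap (fun p => p.2))
        = PySem.Set.update s (l.flatMap (fun p => PySem.List.dedup p.2)) := by
  induction l with
  | nil => intro s; rfl
  | cons p l ih =>
    intro s
    simp only [List.flatMap_cons, PySem.Set.update_append]
    rw [show PySem.Set.update s (PySem.List.dedup p.2) = PySem.Set.update s p.2 from by
      rw [PySem.List.dedup_eq_ofList, pv_update_ofList]]
    exact ih _

lemma pv_seen_eq (arr : List (List Int)) :
    PySem.Set.ofList ((pvPairsA arr).map (fun q => q.2))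
      = PySem.Set.ofList ((pvPairsB arr).map (fun q => q.1)) := by
  have hA : (pvPairsA arr).map (fun q => q.2)
      = (PySem.List.enumerate arr 0).flatMap (fun p => p.2) := by
    simp [pvPairsA, List.map_flatMap, List.map_map, Function.comp_def]
  have hB : (pvPairsB arr).map (fun q => q.1)
      = (PySem.List.enumerate arr 0).flatMap (fun p => PySem.List.dedup p.2) := by
    simp [pvPairsB, List.map_flatMap, List.map_map, Function.comp_def]
  rw [hA, hB, ← PySem.Set.update_nil_left, ← PySem.Set.update_nil_left]
  exact pv_upd_flat _ []

-- ===== VERDICT (by name: the statement is the Claim_ definition above) =====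
theorem find_shared_indexes_spec : Claim_equal_find_shared_indexes := by
  intro arr _
  unfold Spec_find_shared_indexes
  rw [pvA_eq, pvB_eq, pv_seen_eq]
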